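-- pv_equiv track=rewrite | github.com/dltkddns833/investment | scripts/core/scorecard.py | _max_consecutive_loss_days
-- ===== SOURCE A (Python) =====
-- def _max_consecutive_loss_days(daily_returns):
--     """최대 연속 손실일 수"""
--     max_streak = 0
--     current = 0
--     for r in daily_returns:
--         if r < 0:
--             current += 1
--             if current > max_streak:
--                 max_streak = current
--         else:
--             current = 0
--     return max_streak
-- ===== SOURCE B (Python) =====
-- def _max_consecutive_loss_days(daily_returns):
--     # Build the list of consecutive-loss run lengths, then take one max at the end.
--     runs = [0]
--     for r in daily_returns:
--         if r < 0:
--             runs[-1] += 1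
--         else:
--             runs.append(0)
--     return max(runs)
-- ===== Notes on version B (the rewrite author's own statement) =====
-- stated objective: alternative
-- what changed: Replaces the running-counter-with-reset-and-running-max loop by a build-then-reduce decomposition: one pass materialises the list of consecutive-loss run lengths, then a single max over that list produces the answer.
import Mathlib
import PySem

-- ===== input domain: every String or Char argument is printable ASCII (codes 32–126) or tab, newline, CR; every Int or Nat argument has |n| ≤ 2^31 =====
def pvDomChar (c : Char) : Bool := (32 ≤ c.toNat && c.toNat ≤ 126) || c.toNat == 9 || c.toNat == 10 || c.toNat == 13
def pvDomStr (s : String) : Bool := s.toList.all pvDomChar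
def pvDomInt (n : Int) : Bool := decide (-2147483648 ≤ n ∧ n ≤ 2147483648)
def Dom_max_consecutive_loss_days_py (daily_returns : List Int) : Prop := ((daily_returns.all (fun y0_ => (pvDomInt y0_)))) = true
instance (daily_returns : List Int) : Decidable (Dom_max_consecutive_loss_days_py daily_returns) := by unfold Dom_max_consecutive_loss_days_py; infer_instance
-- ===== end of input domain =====

-- ===== PORT A =====
-- Transliteration of A: running current streak and running max, reset on a non-loss day.
def max_consecutive_loss_days_py (daily_returns : List Int) : Int :=
  (daily_returns.foldl
    (fun (s : Int × Int) (r : Int) =>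
      if r < 0 then
        let current := s.2 + 1
        (if current > s.1 then current else s.1, current)
      else
        (s.1, 0))
    (0, 0)).1

-- ===== PORT B =====
-- B: build the list of consecutive-loss run lengths, then take max(runs) once at the end.
def pvRunsStep (runs : List Int) (r : Int) : List Int :=
  if r < 0 then runs.dropLast ++ [runs.getLastD 0 + 1]   -- runs[-1] += 1
  else runs ++ [0]                                       -- runs.append(0)

def max_consecutive_loss_days_py_alt (daily_returns : List Int) : Int :=
  (PySem.List.max? (daily_returns.foldl pvRunsStep [0]) (fun x => x)).getD 0

-- ===== PRECONDITION & SPEC =====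
def Spec_max_consecutive_loss_days_py (daily_returns : List Int) (out : Int) : Prop := out = max_consecutive_loss_days_py_alt daily_returns
instance (daily_returns : List Int) (out : Int) : Decidable (Spec_max_consecutive_loss_days_py daily_returns out) := by unfold Spec_max_consecutive_loss_days_py; infer_instance

-- ===== CLAIM (what is proved, stated in full; the proofs are below) =====
def Claim_equal_max_consecutive_loss_days_py : Prop := ∀ (daily_returns : List Int), Dom_max_consecutive_loss_days_py daily_returns → Spec_max_consecutive_loss_days_py daily_returns (max_consecutive_loss_days_py daily_returns)

-- ===== LEMMAS AND PROOFS =====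

-- max of a runs list as computed by a fold from 0 (proof helper only)
def pvM (runs : List Int) : Int := runs.foldl max 0

theorem pvM_concat (t : List Int) (c : Int) : pvM (t ++ [c]) = max (pvM t) c := by
  simp [pvM]

theorem pvM_nonneg (t : List Int) : 0 ≤ pvM t :=
  (PySem.List.le_foldl_max t 0).1

-- one B-step on a runs list in last-element form
theorem pvRunsStep_neg (t : List Int) (c r : Int) (h : r < 0) :
    pvRunsStep (t ++ [c]) r = t ++ [c + 1] := by
  simp [pvRunsStep, h]

theorem pvRunsStep_nonnegcase (t : List Int) (c r : Int) (h : ¬ r < 0) :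
    pvRunsStep (t ++ [c]) r = (t ++ [c]) ++ [0] := by
  simp [pvRunsStep, h]

-- the B fold keeps the runs list in the form t' ++ [c'] with nonnegative entries
theorem pvRuns_shape (l : List Int) : ∀ (t : List Int) (c : Int), 0 ≤ c → (∀ x ∈ t, 0 ≤ x) →
    ∃ t' c', l.foldl pvRunsStep (t ++ [c]) = t' ++ [c'] ∧ 0 ≤ c' ∧ ∀ x ∈ t', 0 ≤ x := by
  induction l with
  | nil => intro t c hc ht; exact ⟨t, c, by simp, hc, ht⟩
  | cons r rest ih =>
      intro t c hc ht
      by_cases h : r < 0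
      · simpa [List.foldl_cons, pvRunsStep_neg t c r h] using ih t (c + 1) (by omega) ht
      · have ht' : ∀ x ∈ t ++ [c], 0 ≤ x := by
          intro x hx
          rcases List.mem_append.1 hx with hx | hx
          · exact ht x hx
          · simp at hx; omega
        simpa [List.foldl_cons, pvRunsStep_nonnegcase t c r h] using
          ih (t ++ [c]) 0 le_rfl ht'

-- main invariant: A's running max equals pvM of B's runs list
theorem pvMain (l : List Int) : ∀ (t : List Int) (c : Int),
    (l.foldl
      (fun (s : Int × Int) (r : Int) =>
        if r < 0 then
          let current := s.2 + 1
          (if current > s.1 then current else s.1, current)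
        else
          (s.1, 0))
      (pvM (t ++ [c]), c)).1
    = pvM (l.foldl pvRunsStep (t ++ [c])) := by
  induction l with
  | nil => intro t c; rfl
  | cons r rest ih =>
      intro t c
      by_cases h : r < 0
      · have hA : (if c + 1 > pvM (t ++ [c]) then c + 1 else pvM (t ++ [c])) = pvM (t ++ [c + 1]) := by
          rw [pvM_concat, pvM_concat]
          rcases le_total (pvM t) c with h1 | h1 <;>
            simp [max_def] <;> omega
        calc _ = (rest.foldl _ (pvM (t ++ [c + 1]), c + 1)).1 := by
                  simp only [List.foldl_cons, if_pos h, hA]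
          _ = pvM (rest.foldl pvRunsStep (t ++ [c + 1])) := ih t (c + 1)
          _ = _ := by rw [List.foldl_cons, pvRunsStep_neg t c r h]
      · have hM : pvM ((t ++ [c]) ++ [0]) = pvM (t ++ [c]) := by
          rw [pvM_concat]
          have := pvM_nonneg (t ++ [c])
          omega
        calc _ = (rest.foldl _ (pvM ((t ++ [c]) ++ [0]), 0)).1 := by
                  simp only [List.foldl_cons, if_neg h, hM]
          _ = pvM (rest.foldl pvRunsStep ((t ++ [c]) ++ [0])) := ih (t ++ [c]) 0
          _ = _ := by rw [List.foldl_cons, pvRunsStep_nonnegcase t c r h]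

-- Python max over a nonempty list of nonnegative ints equals the fold-from-0 max
theorem pvMax?_eq_pvM (runs : List Int) (hne : runs ≠ []) (hnn : ∀ x ∈ runs, 0 ≤ x) :
    (PySem.List.max? runs (fun x => x)).getD 0 = pvM runs := by
  cases runs with
  | nil => exact absurd rfl hne
  | cons x s =>
      rw [PySem.List.max?_id_cons]
      have hx : (0 : Int) ≤ x := hnn x (by simp)
      simp [pvM, max_eq_right hx]

-- ===== VERDICT (by name: the statement is the Claim_ definition above) =====
theorem max_consecutive_loss_days_py_spec : Claim_equal_max_consecutive_loss_days_py := by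
  intro l _
  unfold Spec_max_consecutive_loss_days_py max_consecutive_loss_days_py max_consecutive_loss_days_py_alt
  obtain ⟨t', c', hshape, hc', ht'⟩ := pvRuns_shape l [] 0 le_rfl (by simp)
  have hmain := pvMain l [] 0
  have h0 : pvM ([] ++ [(0 : Int)]) = 0 := by simp [pvM]
  rw [h0] at hmain
  simp only [List.nil_append] at hmain hshape
  rw [hmain, pvMax?_eq_pvM]
  · rw [hshape]; simp
  · rw [hshape]
    intro x hx
    rcases List.mem_append.1 hx with hx | hx
    · exact ht' x hx
    · simp at hx; omega
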